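-- pv_equiv track=rewrite | github.com/RikhiSingh/LeetCode | local/findDigitIndex.py | finddigitIndex
-- ===== SOURCE A (Python) =====
-- def finddigitIndex(target):
--     initial = 1
--     index = 0
--
--     while True:
--         num_str = str(initial) # Convert the current number to a string
--         num_len = len(num_str) # Get the number of digits in the current number
--
--         # Check if the target index x is within the range of digits for this number
--         if index + num_len > target:
--             # If so, return the specific digit in the current number
--             return num_str[target - index]
--
--         else:
--             # Otherwise, move to the next number and update the index
--             index += num_len
--             initial += 1
-- ===== SOURCE B (Python) =====
-- def finddigitIndex(target):
--     d = 1        # current digit-length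
--     count = 9    # how many numbers have d digits
--     start = 1    # first number with d digits
--     while target >= d * count:
--         target -= d * count
--         d += 1
--         count *= 10
--         start *= 10
--     num = start + target // d
--     return str(num)[target % d]
-- ===== Notes on version B (the rewrite author's own statement) =====
-- stated objective: faster
-- what changed: Instead of scanning numbers one by one accumulating digit counts, B jumps over whole digit-length blocks (9 one-digit, 90 two-digit, ...) and then locates the number and digit by a single division and modulo.
-- outside the precondition, e.g. on finddigitIndex(-1): A returns '1', B returns '0'; on finddigitIndex(-2): A raises IndexError, B returns '-'
import Mathlib
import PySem

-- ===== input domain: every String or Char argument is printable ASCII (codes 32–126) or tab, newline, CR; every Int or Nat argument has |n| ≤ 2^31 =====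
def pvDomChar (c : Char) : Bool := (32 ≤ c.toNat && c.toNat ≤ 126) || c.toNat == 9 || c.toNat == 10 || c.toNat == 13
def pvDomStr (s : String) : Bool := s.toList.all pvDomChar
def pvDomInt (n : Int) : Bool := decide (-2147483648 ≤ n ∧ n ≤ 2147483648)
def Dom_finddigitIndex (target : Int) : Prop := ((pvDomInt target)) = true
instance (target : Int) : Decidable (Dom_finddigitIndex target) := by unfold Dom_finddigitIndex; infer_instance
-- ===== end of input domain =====

-- B replaces A's one-number-at-a-time scan with digit-length block jumps plus one division/modulo
-- (objective: faster). Return values only; neither program mutates anything.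

-- ===== PORT A =====
-- A's 'while True' loop; the fuel argument only makes the recursion total: index grows by at
-- least 1 per iteration and the loop exits once index + num_len > target, so target.toNat + 1
-- iterations always suffice.  "" in the none branch is Python's IndexError (excluded by Pre_).
def finddigitIndexGo (target : Int) : Nat → Int → Int → String
  | 0, _, _ => ""
  | fuel + 1, initial, index =>
    let numStr := PySem.Int.toChars initial
    let numLen : Int := (numStr.length : Int)
    if index + numLen > target then
      match PySem.List.pyGet? numStr (target - index) with
      | some c => String.ofList [c]
      | none => ""
    else
      finddigitIndexGo target fuel (initial + 1) (index + numLen)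

def finddigitIndex (target : Int) : String :=
  finddigitIndexGo target (target.toNat + 1) 1 0

-- ===== PORT B =====
-- B's while loop; fuel again only for totality: each taken iteration subtracts d*count ≥ 9
-- from t, so target.toNat + 1 iterations always suffice for the initial call.
def finddigitIndexAltGo : Nat → Int → Int → Int → Int → String
  | 0, _, _, _, _ => ""
  | fuel + 1, t, d, count, start =>
    if t ≥ d * count then
      finddigitIndexAltGo fuel (t - d * count) (d + 1) (count * 10) (start * 10)
    else
      let num := start + PySem.Int.floordiv t d
      match PySem.List.pyGet? (PySem.Int.toChars num) (PySem.Int.mod t d) with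
      | some c => String.ofList [c]
      | none => ""

def finddigitIndex_alt (target : Int) : String :=
  finddigitIndexAltGo (target.toNat + 1) target 1 9 1

-- ===== PRECONDITION & SPEC =====
-- Pre_ restricts to the natural domain target ≥ 0: on target ≤ -2 A raises IndexError, and at
-- target = -1 A returns "1" only through Python's negative-index wraparound (a corner no one
-- would specify); B returns "0" there.
def Pre_finddigitIndex (target : Int) : Prop := 0 ≤ target
instance (target : Int) : Decidable (Pre_finddigitIndex target) := by unfold Pre_finddigitIndex; infer_instance
def pvWitness_finddigitIndex : Int := (11)

def Spec_finddigitIndex (target : Int) (out : String) : Prop := out = finddigitIndex_alt target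
instance (target : Int) (out : String) : Decidable (Spec_finddigitIndex target out) := by unfold Spec_finddigitIndex; infer_instance

-- ===== CLAIM (what is proved, stated in full; the proofs are below) =====
def Claim_equal_finddigitIndex : Prop := ∀ (target : Int), Dom_finddigitIndex target → Pre_finddigitIndex target → Spec_finddigitIndex target (finddigitIndex target)

-- ===== LEMMAS AND PROOFS =====


lemma pvToDigitsCoreLen : ∀ (f n : Nat) (l : List Char), 0 < n → n ≤ f →
    (Nat.toDigitsCore 10 f n l).length = Nat.log 10 n + 1 + l.length := by
  intro f
  induction f with
  | zero => intro n l h1 h2; omega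
  | succ f ih =>
    intro n l h1 h2
    rw [Nat.toDigitsCore]
    by_cases h : n / 10 = 0
    · have hn : n < 10 := by omega
      rw [if_pos h]
      have hlog : Nat.log 10 n = 0 := Nat.log_eq_zero_iff.mpr (Or.inl hn)
      simp [hlog]; omega
    · rw [if_neg h]
      have h10 : 10 ≤ n := by
        by_contra hc
        exact h (Nat.div_eq_of_lt (by omega))
      have hrec := ih (n / 10) (Nat.digitChar (n % 10) :: l) (Nat.pos_of_ne_zero h)
        (by have := Nat.div_lt_self h1 (by norm_num : 1 < 10); omega)
      rw [hrec, Nat.log_div_base]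
      have hpos := Nat.log_pos (by norm_num : 1 < 10) h10
      simp only [List.length_cons]
      omega

lemma pvLenToChars (d : Nat) (hd : 1 ≤ d) (n : Int)
    (h1 : (10:Int)^(d-1) ≤ n) (h2 : n < (10:Int)^d) :
    (PySem.Int.toChars n).length = d := by
  have hpow : (1:Int) ≤ (10:Int)^(d-1) := one_le_pow₀ (by norm_num)
  have hn1 : 1 ≤ n := le_trans hpow h1
  have hnneg : ¬ n < 0 := by omega
  rw [PySem.Int.toChars, if_neg hnneg, Nat.toDigits]
  have h1' : 10^(d-1) ≤ n.toNat := by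
    have : ((10^(d-1) : Nat) : Int) ≤ n := by push_cast; exact h1
    omega
  have h2' : n.toNat < 10^d := by
    have : n < ((10^d : Nat) : Int) := by push_cast; exact h2
    omega
  have hpos : 0 < n.toNat := by omega
  rw [pvToDigitsCoreLen (n.toNat + 1) n.toNat [] hpos (by omega)]
  have hlog : Nat.log 10 n.toNat = d - 1 :=
    Nat.log_eq_of_pow_le_of_lt_pow h1' (by rw [Nat.sub_add_cancel hd]; exact h2')
  simp [hlog]; omega

lemma pvASkip (target : Int) (d : Nat) : ∀ (c fuel : Nat) (initial index : Int),
    (∀ j : Nat, j < c → (PySem.Int.toChars (initial + j)).length = d) →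
    index + (d : Int) * c ≤ target →
    finddigitIndexGo target (c + fuel) initial index
      = finddigitIndexGo target fuel (initial + c) (index + (d : Int) * c) := by
  intro c
  induction c with
  | zero => intro fuel initial index _ _; simp
  | succ c ih =>
    intro fuel initial index hlen hle
    have h0 : (PySem.Int.toChars initial).length = d := by
      have := hlen 0 (by omega); simpa using this
    have hstep : finddigitIndexGo target (c + 1 + fuel) initial index
        = finddigitIndexGo target (c + fuel) (initial + 1) (index + (d : Int)) := by
      rw [show c + 1 + fuel = (c + fuel) + 1 from by omega]
      rw [finddigitIndexGo]
      simp only [h0]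
      rw [if_neg (by push_cast at hle ⊢; nlinarith [hle])]
    rw [hstep, ih fuel (initial + 1) (index + (d : Int))
      (fun j hj => by
        have := hlen (j + 1) (by omega)
        rw [show initial + 1 + (j : Int) = initial + ((j + 1 : Nat) : Int) by push_cast; ring]
        exact this)
      (by push_cast at hle ⊢; linarith)]
    congr 1 <;> push_cast <;> ring

-- base-case arithmetic: 0 ≤ t < d → floordiv t d = 0 ∧ mod t d = t
lemma pvSmall (t : Int) (d : Nat) (hd : 1 ≤ d) (h0 : 0 ≤ t) (h1 : t < (d:Int)) :
    PySem.Int.floordiv t d = 0 ∧ PySem.Int.mod t d = t := by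
  have hdp : (0:Int) < (d:Int) := by exact_mod_cast hd
  have hf : PySem.Int.floordiv t d = 0 := by
    rw [PySem.Int.floordiv_eq_iff_of_pos hdp]; constructor <;> nlinarith
  refine ⟨hf, ?_⟩
  have := PySem.Int.floordiv_mul_add_mod t d
  rw [hf] at this; linarith

lemma pvABlock (target : Int) (d : Nat) (hd : 1 ≤ d) : ∀ (q fuel : Nat) (initial index : Int),
    (∀ j : Nat, j ≤ q → (PySem.Int.toChars (initial + j)).length = d) →
    0 ≤ target - index →
    target - index < (d : Int) * q + d →
    q < fuel →
    finddigitIndexGo target fuel initial index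
      = match PySem.List.pyGet?
          (PySem.Int.toChars (initial + PySem.Int.floordiv (target - index) d))
          (PySem.Int.mod (target - index) d) with
        | some c => String.ofList [c]
        | none => "" := by
  intro q
  induction q with
  | zero =>
    intro fuel initial index hlen h0 h1 hfuel
    obtain ⟨f, rfl⟩ := Nat.exists_eq_succ_of_ne_zero (by omega : fuel ≠ 0)
    have hl0 : (PySem.Int.toChars initial).length = d := by simpa using hlen 0 (by omega)
    have h1' : target - index < (d:Int) := by push_cast at h1; linarith
    obtain ⟨hf, hm⟩ := pvSmall (target - index) d hd h0 h1'
    rw [finddigitIndexGo]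
    simp only [hl0]
    rw [if_pos (by omega)]
    rw [hf, hm]
    simp
  | succ q ih =>
    intro fuel initial index hlen h0 h1 hfuel
    obtain ⟨f, rfl⟩ := Nat.exists_eq_succ_of_ne_zero (by omega : fuel ≠ 0)
    have hl0 : (PySem.Int.toChars initial).length = d := by simpa using hlen 0 (by omega)
    rw [finddigitIndexGo]
    simp only [hl0]
    by_cases hc : index + (d:Int) > target
    · obtain ⟨hf, hm⟩ := pvSmall (target - index) d hd h0 (by omega)
      rw [if_pos hc, hf, hm]
      simp
    · rw [if_neg hc]
      have hdp : (0:Int) < (d:Int) := by exact_mod_cast hd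
      rw [ih f (initial + 1) (index + (d:Int))
        (fun j hj => by
          have := hlen (j + 1) (by omega)
          rw [show initial + 1 + (j : Int) = initial + ((j + 1 : Nat) : Int) by push_cast; ring]
          exact this)
        (by omega)
        (by push_cast at h1 ⊢; linarith)
        (by omega)]
      have ht : target - (index + (d:Int)) = (target - index) - (d:Int) := by ring
      rw [ht]
      have htd : 0 ≤ target - index - (d:Int) := by omega
      have hfd : PySem.Int.floordiv (target - index) d
          = PySem.Int.floordiv (target - index - (d:Int)) d + 1 := by
        rw [PySem.Int.floordiv_eq_ediv_of_pos hdp, PySem.Int.floordiv_eq_ediv_of_pos hdp]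
        rw [show target - index = (target - index - (d:Int)) + 1 * (d:Int) by ring]
        rw [Int.add_mul_ediv_right _ _ (by omega : (d:Int) ≠ 0)]
        ring_nf
      have hmd : PySem.Int.mod (target - index) d
          = PySem.Int.mod (target - index - (d:Int)) d := by
        rw [PySem.Int.mod_eq_emod_of_pos hdp, PySem.Int.mod_eq_emod_of_pos hdp]
        rw [← Int.sub_emod_right (target - index) (d:Int)]
      rw [hfd, hmd]
      rw [show initial + (PySem.Int.floordiv (target - index - (d:Int)) d + 1)
          = initial + 1 + PySem.Int.floordiv (target - index - (d:Int)) d by ring]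

lemma pvMain : ∀ (n : Nat) (target t index : Int) (d fa fb : Nat),
    1 ≤ d → 0 ≤ t → t = target - index → t.toNat ≤ n → n < fa → n < fb →
    finddigitIndexAltGo fb t ((d : Int)) (9 * (10:Int)^(d-1)) ((10:Int)^(d-1))
      = finddigitIndexGo target fa ((10:Int)^(d-1)) index := by
  intro n
  induction n using Nat.strong_induction_on with
  | _ n IH =>
    intro target t index d fa fb hd ht0 hti htn hfa hfb
    obtain ⟨fb', rfl⟩ := Nat.exists_eq_succ_of_ne_zero (by omega : fb ≠ 0)
    set cN : Nat := 9 * 10 ^ (d - 1) with hcN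
    have hcNc : ((cN : Int)) = 9 * (10:Int)^(d-1) := by rw [hcN]; push_cast; ring
    have hstart1 : (1:Int) ≤ (10:Int)^(d-1) := one_le_pow₀ (by norm_num)
    have hd1 : (1:Int) ≤ (d:Int) := by exact_mod_cast hd
    have hcN9 : (9:Int) ≤ (cN:Int) := by rw [hcNc]; linarith
    have hten : (10:Int)^(d-1) * 10 = (10:Int)^d := by
      rw [← pow_succ]; congr 1; omega
    have hdcN : (cN:Int) ≤ ((d:Int)) * cN := by nlinarith
    have hdcN9 : (9:Int) ≤ ((d:Int)) * cN := le_trans hcN9 hdcN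
    rw [finddigitIndexAltGo]
    by_cases hskip : t ≥ (d:Int) * (9 * (10:Int)^(d-1))
    · rw [if_pos hskip]
      have hXt : ((d:Int)) * cN ≤ t := by rw [hcNc]; linarith
      have hcN_le_fa : cN ≤ fa := by omega
      have hlens : ∀ j : Nat, j < cN → (PySem.Int.toChars ((10:Int)^(d-1) + j)).length = d := by
        intro j hj
        apply pvLenToChars d hd
        · linarith [Int.natCast_nonneg j]
        · have hjc : ((j:Int)) < ((cN:Int)) := by exact_mod_cast hj
          rw [hcNc] at hjc
          linarith
      have hA := pvASkip target d cN (fa - cN) ((10:Int)^(d-1)) index hlens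
        (by rw [hcNc]; linarith)
      rw [show cN + (fa - cN) = fa from by omega] at hA
      rw [hA]
      -- apply the induction hypothesis at digit length d + 1
      have hIH := IH (t - (d:Int) * ((cN:Int))).toNat (by omega)
        target (t - (d:Int) * ((cN:Int))) (index + (d:Int) * ((cN:Int))) (d + 1)
        (fa - cN) fb' (by omega) (by omega) (by linarith [hti]) le_rfl (by omega) (by omega)
      have e0 : (d + 1) - 1 = d := by omega
      rw [e0] at hIH
      rw [show ((d:Int)) * ((cN:Int)) = (d:Int) * (9 * (10:Int)^(d-1)) from by rw [hcNc],
          show (((d + 1 : Nat)):Int) = (d:Int) + 1 from by push_cast; ring,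
          show (10:Int)^d = (10:Int)^(d-1) * 10 from hten.symm] at hIH
      rw [show (9 * (10:Int)^(d-1) * 10) = 9 * ((10:Int)^(d-1) * 10) from by ring,
          show (10:Int)^(d-1) + (cN:Int) = (10:Int)^(d-1) * 10 from by rw [hcNc]; ring,
          show index + (d:Int) * (cN:Int) = index + (d:Int) * (9 * (10:Int)^(d-1)) from by
            rw [hcNc]]
      exact hIH
    · rw [if_neg hskip]
      have hlt : t < ((d:Int)) * cN := by rw [hcNc]; linarith [not_le.mp hskip]
      have hdn : 0 < d := hd
      set q : Nat := t.toNat / d with hq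
      have hqcN : q < cN := by
        rw [hq]
        apply (Nat.div_lt_iff_lt_mul hdn).mpr
        have h1 : t.toNat < d * cN := by omega
        rw [Nat.mul_comm cN d]; exact h1
      have hlens : ∀ j : Nat, j ≤ q → (PySem.Int.toChars ((10:Int)^(d-1) + j)).length = d := by
        intro j hj
        apply pvLenToChars d hd
        · linarith [Int.natCast_nonneg j]
        · have hjc : ((j:Int)) < ((cN:Int)) := by exact_mod_cast (by omega : j < cN)
          rw [hcNc] at hjc
          linarith
      have hdm := Nat.div_add_mod t.toNat d
      rw [← hq] at hdm
      have hmod := Nat.mod_lt t.toNat hdn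
      have hB := pvABlock target d hd q fa ((10:Int)^(d-1)) index hlens
        (by omega)
        (by
          have h1 : t.toNat < d * q + d := by omega
          have h2 : ((t.toNat : Int)) < ((d:Int)) * ((q:Int)) + ((d:Int)) := by exact_mod_cast h1
          omega)
        (by have : q ≤ t.toNat := Nat.div_le_self _ _; omega)
      rw [hB, ← hti]

-- ===== VERDICT (by name: the statement is the Claim_ definition above) =====
theorem finddigitIndex_spec : Claim_equal_finddigitIndex := by
  intro target _ hpre
  unfold Spec_finddigitIndex finddigitIndex finddigitIndex_alt
  have h := pvMain target.toNat target target 0 1 (target.toNat + 1) (target.toNat + 1)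
    le_rfl hpre (by omega) le_rfl (by omega) (by omega)
  simpa using h.symm
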